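-- pv_equiv track=rewrite | github.com/paulonteri/data-structures-and-algorithms | solutions/_Patterns for Coding Questions/Two Pointers/dutch_national_flag_problem.py | threeNumberSort0
-- ===== SOURCE A (Python) =====
-- def threeNumberSort0(array, order):
--
--     valueCounts = [0, 0, 0]
--
--     for element in array:
--         orderIdx = order.index(element)
--         valueCounts[orderIdx] += 1
--
--     for i in range(3):
--         value = order[i]
--         count = valueCounts[i]
--         numElementsBefore = sum(valueCounts[:i])
--         for n in range(count):
--             currentIdx = numElementsBefore + n
--             array[currentIdx] = value
--     return array
-- ===== SOURCE B (Python) =====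
-- def threeNumberSort0(array, order):
--     # single stable comparison sort keyed by position in `order`;
--     # slice assignment keeps the in-place mutation and return identity of A
--     array[:] = sorted(array, key=order.index)
--     return array
-- ===== Notes on version B (the rewrite author's own statement) =====
-- stated objective: idiomatic
-- what changed: Replaced the count-then-overwrite three-bucket pass with a single stable sort keyed by each element's position in `order` (array[:] = sorted(array, key=order.index)).
import Mathlib
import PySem

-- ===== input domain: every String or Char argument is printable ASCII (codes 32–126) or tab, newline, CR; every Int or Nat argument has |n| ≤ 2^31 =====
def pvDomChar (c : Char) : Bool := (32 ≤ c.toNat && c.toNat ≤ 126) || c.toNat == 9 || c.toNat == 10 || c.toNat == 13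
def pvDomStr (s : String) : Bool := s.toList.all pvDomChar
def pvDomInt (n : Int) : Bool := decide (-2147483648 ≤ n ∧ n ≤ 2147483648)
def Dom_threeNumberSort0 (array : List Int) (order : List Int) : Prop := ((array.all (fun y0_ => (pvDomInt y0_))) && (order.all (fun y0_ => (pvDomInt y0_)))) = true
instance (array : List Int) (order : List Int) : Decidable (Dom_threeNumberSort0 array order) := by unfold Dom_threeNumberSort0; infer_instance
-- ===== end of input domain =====

-- B replaces A's count-then-overwrite with one stable sort keyed by position in `order` (idiomatic;
-- not claimed faster). In Python both A and B mutate `array` in place (B via slice assignment);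
-- the equivalence proved here is about the RETURN value.

-- ===== PORT A =====
-- loop body of "for element in array: valueCounts[order.index(element)] += 1";
-- under Pre_ orderIdx < 3, so Lean's set/getD are exact (order.index ValueError /
-- valueCounts IndexError are excluded by Pre_)
def pvACountStep (order : List Int) (vc : List Int) (element : Int) : List Int :=
  let orderIdx : Nat := (PySem.List.index? order element).getD 0
  vc.set orderIdx (vc.getD orderIdx 0 + 1)

-- body of "for i in range(3): …"; pyGetD/pySetD are the total forms of order[i] /
-- valueCounts[i] / array[currentIdx] = value, exact under Pre_ (indexes in range there)
def pvAOuterStep (order : List Int) (valueCounts : List Int) (arr : List Int) (i : Int) : List Int :=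
  let value := PySem.List.pyGetD order i 0
  let count := PySem.List.pyGetD valueCounts i 0
  let numElementsBefore := (PySem.List.slice valueCounts none (some i)).foldl (· + ·) 0
  (PySem.List.pyRange 0 count 1).foldl (fun a n =>
    PySem.List.pySetD a (numElementsBefore + n) value) arr

def threeNumberSort0 (array : List Int) (order : List Int) : List Int :=
  let valueCounts : List Int := array.foldl (pvACountStep order) [0, 0, 0]
  (PySem.List.pyRange 0 3 1).foldl (pvAOuterStep order valueCounts) array

-- ===== PORT B =====
def threeNumberSort0_alt (array : List Int) (order : List Int) : List Int :=
  -- sorted(array, key=order.index); the key's ValueError on a missing element is excluded by Pre_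
  PySem.List.sorted array (fun x => ((PySem.List.index? order x).getD 0 : Nat)) false

-- ===== PRECONDITION & SPEC =====
-- Pre_ excludes exactly the inputs on which Python A raises: order shorter than 3 (IndexError at
-- order[i]), or an array element missing from order (ValueError from order.index) or first
-- occurring at index ≥ 3 (IndexError on valueCounts[orderIdx]).
def Pre_threeNumberSort0 (array : List Int) (order : List Int) : Prop :=
  3 ≤ order.length ∧ ∀ x ∈ array, x ∈ order.take 3
instance (array : List Int) (order : List Int) : Decidable (Pre_threeNumberSort0 array order) := by
  unfold Pre_threeNumberSort0; infer_instance

def pvWitness_threeNumberSort0 : List Int × List Int := ([2, 0, 1, 0, 2], [0, 1, 2])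

def Spec_threeNumberSort0 (array : List Int) (order : List Int) (out : List Int) : Prop := out = threeNumberSort0_alt array order
instance (array : List Int) (order : List Int) (out : List Int) : Decidable (Spec_threeNumberSort0 array order out) := by unfold Spec_threeNumberSort0; infer_instance

-- ===== CLAIM (what is proved, stated in full; the proofs are below) =====
def Claim_equal_threeNumberSort0 : Prop := ∀ (array : List Int) (order : List Int), Dom_threeNumberSort0 array order → Pre_threeNumberSort0 array order → Spec_threeNumberSort0 array order (threeNumberSort0 array order)

-- ===== LEMMAS AND PROOFS =====

-- the key both programs effectively arrange by: first index of x in order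
def pvK (order : List Int) (x : Int) : Nat := (PySem.List.index? order x).getD 0

-- number of elements of l whose key is i
def pvCnt (order : List Int) (i : Nat) (l : List Int) : Nat :=
  l.countP (fun x => pvK order x == i)

-- the common canonical result: the three constant blocks in order
def pvCanon (order : List Int) (l : List Int) : List Int :=
  List.replicate (pvCnt order 0 l) (order.getD 0 0)
  ++ List.replicate (pvCnt order 1 l) (order.getD 1 0)
  ++ List.replicate (pvCnt order 2 l) (order.getD 2 0)

-- an element admitted by Pre_: key < 3 and order[key x] = x
def pvGood (order : List Int) (x : Int) : Prop :=
  pvK order x < 3 ∧ order.getD (pvK order x) 0 = x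

theorem pvGood_of_mem_take (order : List Int) (x : Int)
    (hx : x ∈ order.take 3) : pvGood order x := by
  have hxo : x ∈ order := List.mem_of_mem_take hx
  obtain ⟨k, hk⟩ := Option.isSome_iff_exists.mp ((PySem.List.index?_isSome_iff order x).mpr hxo)
  obtain ⟨hklen, hgetk, hmin⟩ := PySem.List.getElem_of_index?_eq_some hk
  obtain ⟨j, hj3, hjget⟩ := List.mem_take_iff_getElem.mp hx
  have hk3 : k < 3 := by
    by_contra hge
    exact hmin j (by omega) hjget
  have hkv : pvK order x = k := by unfold pvK; rw [hk]; rfl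
  refine ⟨by rw [hkv]; exact hk3, ?_⟩
  rw [hkv, List.getD_eq_getElem _ _ hklen, hgetk]

-- every element of a nonempty block has key exactly the block index
theorem pvBlock_key (order : List Int) (l : List Int) (j : Nat)
    (hg : ∀ x ∈ l, pvGood order x) :
    ∀ y ∈ List.replicate (pvCnt order j l) (order.getD j 0), pvK order y = j := by
  intro y hy
  obtain ⟨hne, hyv⟩ := List.mem_replicate.mp hy
  have hpos : 0 < l.countP (fun x => pvK order x == j) := Nat.pos_of_ne_zero hne
  obtain ⟨z, hz, hzj⟩ := List.countP_pos_iff.mp hpos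
  have hzj' : pvK order z = j := by simpa using hzj
  have hgz := (hg z hz).2
  rw [hzj'] at hgz
  rw [hyv, hgz, hzj']

-- PySem.List.insertBy, unfolded
theorem pvIns_cons {α : Type} (b : α → α → Bool) (x y : α) (ys : List α) :
    PySem.List.insertBy b x (y :: ys) =
      if b x y then x :: y :: ys else y :: PySem.List.insertBy b x ys := rfl

theorem pvIns_all_lt {α : Type} (b : α → α → Bool) (x : α) (ys : List α)
    (h : ∀ y ∈ ys, b x y = true) : PySem.List.insertBy b x ys = x :: ys := by
  cases ys with
  | nil => rfl
  | cons y t => rw [pvIns_cons, if_pos (h y (by simp))]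

theorem pvIns_append {α : Type} (b : α → α → Bool) (x : α) (A B : List α)
    (h : ∀ y ∈ A, b x y = false) :
    PySem.List.insertBy b x (A ++ B) = A ++ PySem.List.insertBy b x B := by
  induction A with
  | nil => simp
  | cons a t ih =>
    have ha : b x a = false := h a (by simp)
    simp only [List.cons_append, pvIns_cons, ha, Bool.false_eq_true, ite_false]
    rw [ih (fun y hy => h y (by simp [hy]))]

theorem pvCnt_append_single (order : List Int) (i : Nat) (l : List Int) (x : Int) :
    pvCnt order i (l ++ [x]) = pvCnt order i l + (if pvK order x = i then 1 else 0) := by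
  simp [pvCnt, List.countP_append, List.countP_cons]

-- B (the stable sort by first index in order) equals the canonical form
theorem pvB_canon (array order : List Int)
    (hg : ∀ x ∈ array, pvGood order x) :
    threeNumberSort0_alt array order = pvCanon order array := by
  unfold threeNumberSort0_alt
  rw [PySem.List.sorted_eq_foldl_insertBy]
  induction array using List.reverseRecOn with
  | nil => simp [pvCanon, pvCnt]
  | append_singleton l x ih =>
    have hgl : ∀ z ∈ l, pvGood order z := fun z hz => hg z (by simp [hz])
    have hgx := hg x (by simp)
    rw [List.foldl_append, List.foldl_cons, List.foldl_nil, ih hgl]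
    set b : Int → Int → Bool := fun a c => decide (pvK order a < pvK order c) with hb
    show PySem.List.insertBy b x (pvCanon order l) = pvCanon order (l ++ [x])
    have hbk : ∀ (u v : Int), b u v = decide (pvK order u < pvK order v) := fun _ _ => rfl
    have h0 := pvBlock_key order l 0 hgl
    have h1 := pvBlock_key order l 1 hgl
    have h2 := pvBlock_key order l 2 hgl
    unfold pvCanon
    simp only [pvCnt_append_single]
    have hkx3 := hgx.1
    interval_cases hk : pvK order x
    · -- key 0: x goes to the end of the first block
      have hval : order.getD 0 0 = x := by have := hgx.2; rwa [hk] at this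
      rw [List.append_assoc]
      rw [pvIns_append b x _ _ (by intro y hy; rw [hbk, h0 y hy, hk]; simp)]
      rw [pvIns_all_lt b x _ (by
        intro y hy
        rcases List.mem_append.mp hy with hy1 | hy2
        · rw [hbk, h1 y hy1, hk]; simp
        · rw [hbk, h2 y hy2, hk]; simp)]
      simp [hk, List.replicate_succ', ← List.getD_eq_getElem?_getD, hval]
    · -- key 1: x goes to the end of the second block
      have hval : order.getD 1 0 = x := by have := hgx.2; rwa [hk] at this
      rw [pvIns_append b x _ _ (by
        intro y hy
        rcases List.mem_append.mp hy with hy1 | hy2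
        · rw [hbk, h0 y hy1, hk]; simp
        · rw [hbk, h1 y hy2, hk]; simp)]
      rw [pvIns_all_lt b x _ (by intro y hy; rw [hbk, h2 y hy, hk]; simp)]
      simp [hk, List.replicate_succ', ← List.getD_eq_getElem?_getD, hval]
    · -- key 2: x goes to the very end
      have hval : order.getD 2 0 = x := by have := hgx.2; rwa [hk] at this
      rw [PySem.List.insertBy_of_forall_not_before b x _ (by
        intro y hy
        rcases List.mem_append.mp hy with hy1 | hy2
        · rcases List.mem_append.mp hy1 with hy3 | hy4
          · rw [hbk, h0 y hy3, hk]; simp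
          · rw [hbk, h1 y hy4, hk]; simp
        · rw [hbk, h2 y hy2, hk]; simp)]
      simp [hk, List.replicate_succ', ← List.getD_eq_getElem?_getD, hval]

-- A's counting loop computes the three per-key counts
theorem pvCounts_fold (order : List Int) (l : List Int) (hg : ∀ x ∈ l, pvGood order x) :
    ∀ (a b c : Int),
    l.foldl (pvACountStep order) [a, b, c]
      = [a + (pvCnt order 0 l : Int), b + (pvCnt order 1 l : Int), c + (pvCnt order 2 l : Int)] := by
  induction l with
  | nil => simp [pvCnt]
  | cons x t ih =>
    intro a b c
    have hx := (hg x (by simp)).1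
    have ih' := ih (fun z hz => hg z (by simp [hz]))
    simp only [List.foldl_cons]
    have hkx : (PySem.List.index? order x).getD 0 = pvK order x := rfl
    interval_cases h : pvK order x <;>
    · simp only [pvACountStep, hkx, h, List.set_cons_zero, List.set_cons_succ,
        List.getD_cons_zero, List.getD_cons_succ, ih']
      simp [pvCnt, List.countP_cons, h]
      push_cast
      ring

-- the three counts partition the list
theorem pvCnt_sum (order : List Int) (l : List Int) (hg : ∀ x ∈ l, pvGood order x) :
    pvCnt order 0 l + pvCnt order 1 l + pvCnt order 2 l = l.length := by
  induction l with
  | nil => simp [pvCnt]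
  | cons x t ih =>
    have hx := (hg x (by simp)).1
    have ih' := ih (fun z hz => hg z (by simp [hz]))
    unfold pvCnt at *
    simp only [List.countP_cons, List.length_cons]
    interval_cases h : pvK order x <;> simp <;> omega

-- the inner write loop fills one segment
theorem pvWriteSeg (v : Int) (c : Nat) (X rest : List Int) (h : c ≤ rest.length) (s : Int)
    (hs : s = (X.length : Int)) :
    (PySem.List.pyRange 0 (c : Int) 1).foldl
      (fun a n => PySem.List.pySetD a (s + n) v) (X ++ rest)
    = X ++ List.replicate c v ++ rest.drop c := by
  induction c with
  | zero => simp [PySem.List.pyRange_one_eq_nil]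
  | succ m ih =>
    have hm : m ≤ rest.length := by omega
    have hrange : PySem.List.pyRange 0 ((m + 1 : Nat) : Int) 1
        = PySem.List.pyRange 0 (m : Int) 1 ++ [(m : Int)] := by
      push_cast
      exact PySem.List.pyRange_one_succ_right (by positivity)
    rw [hrange, List.foldl_append, ih hm, List.foldl_cons, List.foldl_nil]
    have hsm : s + (m : Int) = ((X.length + m : Nat) : Int) := by push_cast [hs]; ring
    rw [hsm, PySem.List.pySetD_natCast]
    have hdrop : rest.drop m = rest[m]'(by omega) :: rest.drop (m + 1) :=
      List.drop_eq_getElem_cons (by omega)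
    rw [hdrop]
    rw [show X ++ List.replicate m v ++ (rest[m]'(by omega) :: rest.drop (m + 1))
        = (X ++ List.replicate m v) ++ (rest[m]'(by omega) :: rest.drop (m + 1)) by simp]
    rw [List.set_append_right _ _ (by simp)]
    simp only [List.length_append, List.length_replicate, Nat.sub_self]
    rw [List.set_cons_zero]
    simp [List.replicate_succ']

-- A (count then overwrite) equals the canonical form
theorem pvA_canon (array order : List Int)
    (hg : ∀ x ∈ array, pvGood order x) :
    threeNumberSort0 array order = pvCanon order array := by
  unfold threeNumberSort0
  rw [pvCounts_fold order array hg 0 0 0]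
  simp only [zero_add]
  set n0 := pvCnt order 0 array with hn0
  set n1 := pvCnt order 1 array with hn1
  set n2 := pvCnt order 2 array with hn2
  have hsum : n0 + n1 + n2 = array.length := pvCnt_sum order array hg
  rw [show PySem.List.pyRange 0 3 1 = [0, 1, 2] from rfl,
    List.foldl_cons, List.foldl_cons, List.foldl_cons, List.foldl_nil]
  have hstep1 : pvAOuterStep order [(n0:Int), (n1:Int), (n2:Int)] array 0
      = List.replicate n0 (order.getD 0 0) ++ array.drop n0 := by
    unfold pvAOuterStep
    rw [PySem.List.pyGetD_ofNat', PySem.List.pyGetD_ofNat',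
      show (some (0:Int)) = some ((0:Nat):Int) from rfl, PySem.List.slice_to_natCast]
    simp only [List.getD_cons_zero, List.take_zero, List.foldl_nil]
    have hw := pvWriteSeg (order.getD 0 0) n0 [] array (by omega) 0 (by simp)
    simpa using hw
  rw [hstep1]
  have hstep2 : pvAOuterStep order [(n0:Int), (n1:Int), (n2:Int)]
      (List.replicate n0 (order.getD 0 0) ++ array.drop n0) 1
      = List.replicate n0 (order.getD 0 0) ++ List.replicate n1 (order.getD 1 0)
        ++ array.drop (n0 + n1) := by
    unfold pvAOuterStep
    rw [PySem.List.pyGetD_ofNat', PySem.List.pyGetD_ofNat',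
      show (some (1:Int)) = some ((1:Nat):Int) from rfl, PySem.List.slice_to_natCast]
    simp only [List.getD_cons_zero, List.getD_cons_succ, List.take_succ_cons, List.take_zero,
      List.foldl_cons, List.foldl_nil, zero_add]
    have hw := pvWriteSeg (order.getD 1 0) n1 (List.replicate n0 (order.getD 0 0))
      (array.drop n0) (by simp; omega) ((n0:Int)) (by simp)
    rw [hw, List.drop_drop]
  rw [hstep2]
  have hstep3 : pvAOuterStep order [(n0:Int), (n1:Int), (n2:Int)]
      (List.replicate n0 (order.getD 0 0) ++ List.replicate n1 (order.getD 1 0)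
        ++ array.drop (n0 + n1)) 2
      = pvCanon order array := by
    unfold pvAOuterStep
    rw [PySem.List.pyGetD_ofNat', PySem.List.pyGetD_ofNat',
      show (some (2:Int)) = some ((2:Nat):Int) from rfl, PySem.List.slice_to_natCast]
    simp only [List.getD_cons_zero, List.getD_cons_succ, List.take_succ_cons, List.take_zero,
      List.foldl_cons, List.foldl_nil, zero_add]
    have hw := pvWriteSeg (order.getD 2 0) n2
      (List.replicate n0 (order.getD 0 0) ++ List.replicate n1 (order.getD 1 0))
      (array.drop (n0 + n1)) (by simp; omega) ((n0:Int) + (n1:Int)) (by push_cast; simp)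
    rw [hw, List.drop_drop]
    simp [pvCanon, List.drop_eq_nil_of_le (show array.length ≤ n0 + n1 + n2 by omega),
      List.append_assoc]
    rw [← hn0, ← hn1, ← hn2]
  rw [hstep3]

-- ===== VERDICT (by name: the statement is the Claim_ definition above) =====
theorem threeNumberSort0_spec : Claim_equal_threeNumberSort0 := by
  intro array order _ hpre
  obtain ⟨hlen, hmem⟩ := hpre
  have hg : ∀ x ∈ array, pvGood order x := fun x hx => pvGood_of_mem_take order x (hmem x hx)
  unfold Spec_threeNumberSort0
  rw [pvA_canon array order hg, pvB_canon array order hg]
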